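-- pv_equiv track=rewrite | github.com/masaharu-kato/frechet | frechet.py | reachable_space
-- ===== SOURCE A (Python) =====
-- from typing import Any, Callable, List
--
-- def reachable_space(fs_mat:List[List[bool]]) -> List[List[bool]]:
--     len1 = len(fs_mat)
--     len2 = len(fs_mat[0])
--     re_mat = [[False for _ in range(len2)] for _ in range(len1)] # 全Falseの配列を作成
--
--     # 再帰的に探索を行う
--     def explore(i1:int, i2:int):
--         if i1 >= len1 or i2 >= len2: return # 範囲外
--         if re_mat[i1][i2]: return # 探索済み
--         if not fs_mat[i1][i2]: return # 領域外
--         re_mat[i1][i2] = True # 探索(到達可能として記録)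
--         explore(i1, i2+1) # 上側
--         explore(i1+1, i2) # 右側
--
--     explore(0, 0)
--
--     return re_mat
-- ===== SOURCE B (Python) =====
-- def reachable_space(fs_mat):
--     len2 = len(fs_mat[0])
--     re_mat = []
--     for row in fs_mat:
--         prev = re_mat[-1] if re_mat else None
--         new_row = []
--         for j in range(len2):
--             up = prev[j] if prev is not None else j == 0
--             left = new_row[j - 1] if j > 0 else False
--             new_row.append(bool(row[j]) and (up or left))
--         re_mat.append(new_row)
--     return re_mat
-- ===== Notes on version B (the rewrite author's own statement) =====
-- stated objective: simpler
-- what changed: Replaces the recursive DFS flood fill over a mutable matrix by a single row-major dynamic-programming pass: each cell is reachable iff it is free and is the origin or its up/left neighbour is reachable.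
-- outside the precondition, e.g. on reachable_space([[False], []]): A returns [[False], [False]], B raises IndexError
import Mathlib
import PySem

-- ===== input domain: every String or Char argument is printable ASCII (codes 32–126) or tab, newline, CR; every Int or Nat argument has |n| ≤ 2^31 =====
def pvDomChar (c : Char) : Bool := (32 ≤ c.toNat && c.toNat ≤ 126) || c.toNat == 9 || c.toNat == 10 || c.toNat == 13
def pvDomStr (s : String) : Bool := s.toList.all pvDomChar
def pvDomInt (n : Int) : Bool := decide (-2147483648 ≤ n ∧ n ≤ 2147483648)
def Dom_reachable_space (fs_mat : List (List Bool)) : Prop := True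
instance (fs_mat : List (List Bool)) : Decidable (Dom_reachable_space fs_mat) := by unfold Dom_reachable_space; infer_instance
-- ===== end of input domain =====

-- B replaces A's recursive DFS flood fill by a single row-major dynamic-programming pass (simpler); same cost.

-- ===== PORT A =====
-- the inner recursive `explore`: re_mat is threaded as state; termination on (len1-i1)+(len2-i2)
def exploreA (fs : List (List Bool)) (len1 len2 : Nat) (i1 i2 : Nat) (re : List (List Bool)) :
    List (List Bool) :=
  if i1 ≥ len1 ∨ i2 ≥ len2 then re
  else if (re.getD i1 []).getD i2 false then re
  else if !((fs.getD i1 []).getD i2 false) then re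
  else
    let re1 := re.modify i1 (fun row => row.set i2 true)
    let re2 := exploreA fs len1 len2 i1 (i2+1) re1
    exploreA fs len1 len2 (i1+1) i2 re2
termination_by (len1 - i1) + (len2 - i2)
decreasing_by all_goals omega

def reachable_space (fs_mat : List (List Bool)) : List (List Bool) :=
  let len1 := fs_mat.length
  let len2 := (fs_mat.headD []).length   -- fs_mat[0]: IndexError on [] — excluded by Pre_
  let re_mat := (List.range len1).map (fun _ => (List.range len2).map (fun _ => false))
  exploreA fs_mat len1 len2 0 0 re_mat

-- ===== PORT B =====
def reachable_space_alt (fs_mat : List (List Bool)) : List (List Bool) :=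
  let len2 := (fs_mat.headD []).length
  fs_mat.foldl (fun re_mat row =>
    let prev : Option (List Bool) := re_mat.getLast?
    let new_row := (List.range len2).foldl (fun new_row j =>
      let up := match prev with | some p => p.getD j false | none => decide (j = 0)
      let left := if 0 < j then new_row.getD (j-1) false else false
      new_row ++ [row.getD j false && (up || left)]) []
    re_mat ++ [new_row]) []

-- ===== PRECONDITION & SPEC =====
-- Pre_ excludes the empty matrix, where A raises IndexError on fs_mat[0], and ragged matrices with a
-- row shorter than the first row, where B's full-grid pass raises IndexError while A may return when
-- the missing cell is never reached by the flood fill.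
def Pre_reachable_space (fs_mat : List (List Bool)) : Prop :=
  fs_mat ≠ [] ∧ ∀ row ∈ fs_mat, (fs_mat.headD []).length ≤ row.length
instance (fs_mat : List (List Bool)) : Decidable (Pre_reachable_space fs_mat) := by
  unfold Pre_reachable_space; infer_instance
def pvWitness_reachable_space : List (List Bool) := [[true, false], [true, true]]
def Spec_reachable_space (fs_mat : List (List Bool)) (out : List (List Bool)) : Prop := out = reachable_space_alt fs_mat
instance (fs_mat : List (List Bool)) (out : List (List Bool)) : Decidable (Spec_reachable_space fs_mat out) := by unfold Spec_reachable_space; infer_instance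

-- ===== CLAIM (what is proved, stated in full; the proofs are below) =====
def Claim_equal_reachable_space : Prop := ∀ (fs_mat : List (List Bool)), Dom_reachable_space fs_mat → Pre_reachable_space fs_mat → Spec_reachable_space fs_mat (reachable_space fs_mat)

-- ===== LEMMAS AND PROOFS =====

-- matrix access / shape helpers

-- the reachability recurrence both programs compute
def Rb (fs : List (List Bool)) (len1 len2 : Nat) (i j : Nat) : Bool :=
  decide (i < len1) && decide (j < len2) && (fs.getD i []).getD j false &&
    ((decide (i = 0) && decide (j = 0)) ||
     (if _h : 0 < i then Rb fs len1 len2 (i-1) j else false) ||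
     (if _h : 0 < j then Rb fs len1 len2 i (j-1) else false))
termination_by i + j
decreasing_by all_goals omega

def cellF (fs : List (List Bool)) (i j : Nat) : Bool := (fs.getD i []).getD j false
def getM (re : List (List Bool)) (i j : Nat) : Bool := (re.getD i []).getD j false
def ShapeM (len1 len2 : Nat) (re : List (List Bool)) : Prop :=
  re.length = len1 ∧ ∀ a, a < len1 → (re.getD a []).length = len2

theorem getD_modify (re : List (List Bool)) (i a : Nat) (f : List Bool → List Bool)
    (hi : i < re.length) :
    (re.modify i f).getD a [] = if a = i then f (re.getD i []) else re.getD a [] := by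
  by_cases h : a = i
  · simp [h, List.getD_eq_getElem?_getD, hi]
  · simp only [h, if_false]
    rcases Nat.lt_or_ge a re.length with h2 | h2
    · simp [List.getD_eq_getElem?_getD, h2, Ne.symm h]
    · simp [List.getD_eq_getElem?_getD, List.getElem?_modify, List.getElem?_eq_none h2]

theorem get_mark (re : List (List Bool)) (i j a b : Nat)
    (hi : i < re.length) (hj : j < (re.getD i []).length) :
    getM (re.modify i (fun row => row.set j true)) a b =
      if a = i ∧ b = j then true else getM re a b := by
  unfold getM
  rw [getD_modify re i a _ hi]
  by_cases ha : a = i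
  · subst ha
    by_cases hb : b = j
    · subst hb
      have hj' : b < (re.getD a []).length := hj
      simp only [List.getD_eq_getElem?_getD] at hj' ⊢
      simp [List.getElem?_set_self hj']
    · simp [hb, List.getD_eq_getElem?_getD, List.getElem?_set_ne (Ne.symm hb)]
  · simp [ha]

theorem shape_mark {len1 len2 : Nat} {re : List (List Bool)} (h : ShapeM len1 len2 re)
    (i j : Nat) (hi : i < len1) :
    ShapeM len1 len2 (re.modify i (fun row => row.set j true)) := by
  obtain ⟨h1, h2⟩ := h
  refine ⟨by simpa using h1, fun a ha => ?_⟩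
  rw [getD_modify re i a _ (h1 ▸ hi)]
  have e2 := h2 _ ha; have e1 := h2 _ hi
  by_cases hai : a = i <;> simp [hai] <;> simp [List.getD_eq_getElem?_getD] at e1 e2 <;> simp [e1, e2]

theorem exploreA_main (fs : List (List Bool)) (len1 len2 : Nat) :
    ∀ i1 i2 re, ShapeM len1 len2 re →
    ShapeM len1 len2 (exploreA fs len1 len2 i1 i2 re) ∧
    (∀ a b, getM re a b = true → getM (exploreA fs len1 len2 i1 i2 re) a b = true) ∧
    (i1 < len1 → i2 < len2 → cellF fs i1 i2 = true →
      getM (exploreA fs len1 len2 i1 i2 re) i1 i2 = true) ∧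
    (∀ a b, getM (exploreA fs len1 len2 i1 i2 re) a b = true → getM re a b = false →
      (a+1 < len1 → cellF fs (a+1) b = true →
        getM (exploreA fs len1 len2 i1 i2 re) (a+1) b = true) ∧
      (b+1 < len2 → cellF fs a (b+1) = true →
        getM (exploreA fs len1 len2 i1 i2 re) a (b+1) = true)) := by
  intro i1 i2 re hsh
  fun_induction exploreA fs len1 len2 i1 i2 re with
  | case1 i1 i2 re h =>
    refine ⟨hsh, fun a b hb => hb, fun h1 h2 _ => absurd h (by omega), ?_⟩
    intro a b h1 h2; rw [h1] at h2; exact absurd h2 (by simp)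
  | case2 i1 i2 re h hvis =>
    refine ⟨hsh, fun a b hb => hb, fun _ _ _ => hvis, ?_⟩
    intro a b h1 h2; rw [h1] at h2; exact absurd h2 (by simp)
  | case3 i1 i2 re h hvis hfs =>
    refine ⟨hsh, fun a b hb => hb, fun _ _ hc => absurd hc (by simpa [cellF] using hfs), ?_⟩
    intro a b h1 h2; rw [h1] at h2; exact absurd h2 (by simp)
  | case4 i1 i2 re h hvis hfs re1 re2 ihA ihB ihC =>
    have hi1 : i1 < len1 := by omega
    have hi2 : i2 < len2 := by omega
    have hsh1 : ShapeM len1 len2 re1 := shape_mark hsh i1 i2 hi1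
    have hmark : ∀ a b, getM re1 a b = if a = i1 ∧ b = i2 then true else getM re a b :=
      fun a b => get_mark re i1 i2 a b (hsh.1 ▸ hi1) (by rw [hsh.2 i1 hi1]; exact hi2)
    obtain ⟨sh2, mono1, mark1, hand1⟩ := ihA hsh1
    obtain ⟨sh3, mono2, mark2, hand2⟩ := ihC sh2
    have m01 : ∀ a b, getM re a b = true → getM re1 a b = true := by
      intro a b hb; rw [hmark]; split <;> simp [hb]
    have hre1ii : getM re1 i1 i2 = true := by rw [hmark]; simp
    refine ⟨sh3, fun a b hb => mono2 _ _ (mono1 _ _ (m01 a b hb)), fun _ _ _ => mono2 _ _ (mono1 _ _ hre1ii), ?_⟩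
    intro a b hres hreF
    by_cases hab : a = i1 ∧ b = i2
    · obtain ⟨rfl, rfl⟩ := hab
      exact ⟨fun hl hc => mark2 hl hi2 hc, fun hl hc => mono2 _ _ (mark1 hi1 hl hc)⟩
    · have hre1 : getM re1 a b = getM re a b := by rw [hmark, if_neg hab]
      by_cases h2 : getM re2 a b = true
      · have hh := hand1 a b h2 (by rw [hre1]; exact hreF)
        exact ⟨fun hl hc => mono2 _ _ (hh.1 hl hc), fun hl hc => mono2 _ _ (hh.2 hl hc)⟩
      · exact hand2 a b hres (by simpa using h2)

theorem exploreA_sound (fs : List (List Bool)) (len1 len2 : Nat) :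
    ∀ i1 i2 re, ShapeM len1 len2 re →
    (∀ a b, getM re a b = true → Rb fs len1 len2 a b = true) →
    (i1 < len1 → i2 < len2 → cellF fs i1 i2 = true →
      (i1 = 0 ∧ i2 = 0) ∨ (0 < i1 ∧ getM re (i1-1) i2 = true) ∨
      (0 < i2 ∧ getM re i1 (i2-1) = true)) →
    ∀ a b, getM (exploreA fs len1 len2 i1 i2 re) a b = true → Rb fs len1 len2 a b = true := by
  intro i1 i2 re hsh hinv htrig
  fun_induction exploreA fs len1 len2 i1 i2 re with
  | case1 i1 i2 re h => exact hinv
  | case2 i1 i2 re h hvis => exact hinv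
  | case3 i1 i2 re h hvis hfs => exact hinv
  | case4 i1 i2 re h hvis hfs re1 re2 ihA ihB ihC =>
    have hi1 : i1 < len1 := by omega
    have hi2 : i2 < len2 := by omega
    have hcell : cellF fs i1 i2 = true := by simpa [cellF] using hfs
    have hsh1 : ShapeM len1 len2 re1 := shape_mark hsh i1 i2 hi1
    have hmark : ∀ a b, getM re1 a b = if a = i1 ∧ b = i2 then true else getM re a b :=
      fun a b => get_mark re i1 i2 a b (hsh.1 ▸ hi1) (by rw [hsh.2 i1 hi1]; exact hi2)
    -- the newly marked cell satisfies the recurrence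
    have hRb : Rb fs len1 len2 i1 i2 = true := by
      rcases htrig hi1 hi2 hcell with ⟨h0, h0'⟩ | ⟨hp, hg⟩ | ⟨hp, hg⟩
      · subst h0; subst h0'; rw [Rb]; simp [hi1, hi2, cellF] at hcell ⊢; exact hcell
      · rw [Rb]; simp [hi1, hi2, hp, cellF] at hcell ⊢
        exact ⟨hcell, Or.inl (Or.inr (hinv _ _ hg))⟩
      · rw [Rb]; simp [hi1, hi2, hp, cellF] at hcell ⊢
        exact ⟨hcell, Or.inr (hinv _ _ hg)⟩
    have hinv1 : ∀ a b, getM re1 a b = true → Rb fs len1 len2 a b = true := by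
      intro a b hb; rw [hmark] at hb
      by_cases hab : a = i1 ∧ b = i2
      · obtain ⟨rfl, rfl⟩ := hab; exact hRb
      · rw [if_neg hab] at hb; exact hinv a b hb
    have hre1ii : getM re1 i1 i2 = true := by rw [hmark]; simp
    have htrig1 : i1 < len1 → i2 + 1 < len2 → cellF fs i1 (i2+1) = true →
        (i1 = 0 ∧ i2 + 1 = 0) ∨ (0 < i1 ∧ getM re1 (i1-1) (i2+1) = true) ∨
        (0 < i2 + 1 ∧ getM re1 i1 (i2+1-1) = true) := by
      intro _ _ _; exact Or.inr (Or.inr ⟨by omega, by simpa using hre1ii⟩)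
    have hinv2 := ihA hsh1 hinv1 htrig1
    have hsh2 : ShapeM len1 len2 re2 := (exploreA_main fs len1 len2 i1 (i2+1) re1 hsh1).1
    have hmono1 := (exploreA_main fs len1 len2 i1 (i2+1) re1 hsh1).2.1
    have htrig2 : i1 + 1 < len1 → i2 < len2 → cellF fs (i1+1) i2 = true →
        (i1 + 1 = 0 ∧ i2 = 0) ∨ (0 < i1 + 1 ∧ getM re2 (i1+1-1) i2 = true) ∨
        (0 < i2 ∧ getM re2 (i1+1) (i2-1) = true) := by
      intro _ _ _
      exact Or.inr (Or.inl ⟨by omega, by simpa using hmono1 _ _ hre1ii⟩)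
    exact ihC hsh2 hinv2 htrig2

def Zmat (len1 len2 : Nat) : List (List Bool) :=
  (List.range len1).map (fun _ => (List.range len2).map (fun _ => false))

theorem shape_Zmat (len1 len2 : Nat) : ShapeM len1 len2 (Zmat len1 len2) := by
  refine ⟨by simp [Zmat], fun a ha => ?_⟩
  simp [Zmat, List.getD_eq_getElem?_getD, ha]

theorem getM_Zmat (len1 len2 a b : Nat) : getM (Zmat len1 len2) a b = false := by
  unfold getM Zmat
  simp only [List.getD_eq_getElem?_getD]
  rcases Nat.lt_or_ge a len1 with h | h <;> rcases Nat.lt_or_ge b len2 with h2 | h2 <;>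
    simp [h, h2, Nat.not_lt.mpr]

theorem getM_exploreA_eq_Rb (fs : List (List Bool)) (len1 len2 : Nat) (a b : Nat) :
    getM (exploreA fs len1 len2 0 0 (Zmat len1 len2)) a b = Rb fs len1 len2 a b := by
  have hZ := shape_Zmat len1 len2
  obtain ⟨hshM, hmono, hmark, hhand⟩ := exploreA_main fs len1 len2 0 0 (Zmat len1 len2) hZ
  have hsound := exploreA_sound fs len1 len2 0 0 (Zmat len1 len2) hZ
    (fun a b hb => by rw [getM_Zmat] at hb; exact absurd hb (by simp))
    (fun _ _ _ => Or.inl ⟨rfl, rfl⟩)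
  have hcomplete : ∀ n a b, a + b = n → Rb fs len1 len2 a b = true →
      getM (exploreA fs len1 len2 0 0 (Zmat len1 len2)) a b = true := by
    intro n
    induction n using Nat.strong_induction_on with
    | _ n ih =>
      intro a b hab hr
      rw [Rb] at hr
      simp only [Bool.and_eq_true, Bool.or_eq_true, decide_eq_true_eq] at hr
      obtain ⟨⟨⟨ha, hb⟩, hcell⟩, hdisj⟩ := hr
      rcases Nat.eq_zero_or_pos a with hA | hA
      · subst hA
        rcases Nat.eq_zero_or_pos b with hB | hB
        · subst hB; exact hmark ha hb hcell
        · have hbne : ¬ b = 0 := by omega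
          simp [hbne, hB] at hdisj
          have hprev := ih (0 + (b-1)) (by omega) 0 (b-1) rfl hdisj
          have hstep := (hhand 0 (b-1) hprev (getM_Zmat _ _ _ _)).2
          have hb1 : b - 1 + 1 = b := by omega
          rw [hb1] at hstep
          exact hstep hb hcell
      · have hane : ¬ a = 0 := by omega
        rcases Nat.eq_zero_or_pos b with hB | hB
        · subst hB
          simp [hane, hA] at hdisj
          have hprev := ih ((a-1) + 0) (by omega) (a-1) 0 rfl hdisj
          have hstep := (hhand (a-1) 0 hprev (getM_Zmat _ _ _ _)).1
          have ha1 : a - 1 + 1 = a := by omega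
          rw [ha1] at hstep
          exact hstep ha hcell
        · simp [hane, hA, hB] at hdisj
          rcases hdisj with hd | hd
          · have hprev := ih ((a-1) + b) (by omega) (a-1) b rfl hd
            have hstep := (hhand (a-1) b hprev (getM_Zmat _ _ _ _)).1
            have ha1 : a - 1 + 1 = a := by omega
            rw [ha1] at hstep
            exact hstep ha hcell
          · have hprev := ih (a + (b-1)) (by omega) a (b-1) rfl hd
            have hstep := (hhand a (b-1) hprev (getM_Zmat _ _ _ _)).2
            have hb1 : b - 1 + 1 = b := by omega
            rw [hb1] at hstep
            exact hstep hb hcell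
  by_cases hR : Rb fs len1 len2 a b = true
  · rw [hR]; exact hcomplete (a+b) a b rfl hR
  · cases hx : getM (exploreA fs len1 len2 0 0 (Zmat len1 len2)) a b
    · rw [Bool.not_eq_true] at hR; rw [hR]
    · exact absurd (hsound a b hx) hR

def rowR (fs : List (List Bool)) (len1 len2 : Nat) (i : Nat) : List Bool :=
  (List.range len2).map (fun j => Rb fs len1 len2 i j)

def matR (fs : List (List Bool)) (len1 len2 : Nat) (k : Nat) : List (List Bool) :=
  (List.range k).map (fun i => rowR fs len1 len2 i)

-- one inner B step produces the next Rb value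
theorem inner_fold_eq (fs : List (List Bool)) (len1 len2 : Nat) (i : Nat) (hi : i < len1)
    (row : List Bool) (hrow : row = fs.getD i [])
    (prev : Option (List Bool))
    (hprev : prev = if i = 0 then none else some (rowR fs len1 len2 (i-1))) :
    ∀ n, n ≤ len2 →
      (List.range n).foldl (fun new_row j =>
        let up := match prev with | some p => p.getD j false | none => decide (j = 0)
        let left := if 0 < j then new_row.getD (j-1) false else false
        new_row ++ [row.getD j false && (up || left)]) [] =
      (List.range n).map (fun j => Rb fs len1 len2 i j) := by
  subst hprev
  subst hrow
  intro n
  induction n with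
  | zero => simp
  | succ n ihn =>
    intro hn
    rw [List.range_succ, List.foldl_append, List.map_append, ihn (by omega)]
    simp only [List.foldl_cons, List.foldl_nil, List.map_cons, List.map_nil]
    congr 1
    have hval : Rb fs len1 len2 i n =
        ((fs.getD i []).getD n false &&
          ((match (if i = 0 then none else some (rowR fs len1 len2 (i-1))) with
            | some p => p.getD n false | none => decide (n = 0)) ||
           (if 0 < n then ((List.range n).map (fun j => Rb fs len1 len2 i j)).getD (n-1) false
            else false))) := by
      conv_lhs => rw [Rb]
      have hn' : n < len2 := by omega
      rcases Nat.eq_zero_or_pos i with hI | hI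
      · subst hI
        rcases Nat.eq_zero_or_pos n with hN | hN
        · subst hN; simp [hi, hn']
        · have hne : ¬ n = 0 := by omega
          rw [PySem.List.getD_map_range _ _ _ _ (by omega : n - 1 < n)]
          simp [hi, hn', hne, hN]
      · have hine : ¬ i = 0 := by omega
        rcases Nat.eq_zero_or_pos n with hN | hN
        · subst hN
          simp [hi, hn', hine, hI, rowR]
        · have hne : ¬ n = 0 := by omega
          rw [PySem.List.getD_map_range _ _ _ _ (by omega : n - 1 < n)]
          simp [hi, hn', hine, hI, hN, rowR]
    rw [hval]

theorem getLast?_matR (fs : List (List Bool)) (len1 len2 k : Nat) :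
    (matR fs len1 len2 k).getLast? =
      if k = 0 then none else some (rowR fs len1 len2 (k-1)) := by
  rw [List.getLast?_eq_getElem?]
  rcases Nat.eq_zero_or_pos k with hk | hk
  · subst hk; simp [matR]
  · have hne : ¬ k = 0 := by omega
    simp [matR, hne, List.getElem?_map, List.getElem?_range (by omega : k - 1 < k)]

theorem outer_fold (fs : List (List Bool)) (len2 : Nat) :
    ∀ m k acc, k + m = fs.length → acc = matR fs fs.length len2 k →
    List.foldl (fun re_mat row =>
      let prev : Option (List Bool) := re_mat.getLast?
      let new_row := (List.range len2).foldl (fun new_row j =>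
        let up := match prev with | some p => p.getD j false | none => decide (j = 0)
        let left := if 0 < j then new_row.getD (j-1) false else false
        new_row ++ [row.getD j false && (up || left)]) []
      re_mat ++ [new_row]) acc (fs.drop k) = matR fs fs.length len2 fs.length := by
  intro m
  induction m with
  | zero =>
    intro k acc hk hacc
    rw [show k = fs.length by omega] at hacc ⊢
    simp [hacc]
  | succ m ihm =>
    intro k acc hk hacc
    have hklt : k < fs.length := by omega
    rw [List.drop_eq_getElem_cons hklt, List.foldl_cons]
    apply ihm (k+1) _ (by omega)
    simp only [hacc, getLast?_matR]
    rw [inner_fold_eq fs fs.length len2 k hklt fs[k]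
      (by rw [List.getD_eq_getElem fs [] hklt])
      _ rfl len2 (le_refl len2)]
    simp [matR, List.range_succ, rowR]

theorem B_eq_matR (fs : List (List Bool)) :
    reachable_space_alt fs = matR fs fs.length (fs.headD []).length fs.length := by
  have h := outer_fold fs (fs.headD []).length fs.length 0 [] (by omega) (by simp [matR])
  simpa [reachable_space_alt] using h

theorem exploreA_eq_matR (fs : List (List Bool)) (len1 len2 : Nat) :
    exploreA fs len1 len2 0 0 (Zmat len1 len2) = matR fs len1 len2 len1 := by
  have hsh := (exploreA_main fs len1 len2 0 0 _ (shape_Zmat len1 len2)).1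
  apply List.ext_getElem
  · rw [hsh.1]; simp [matR]
  · intro i h1 h2
    have hi : i < len1 := hsh.1 ▸ h1
    have hrowlen : (exploreA fs len1 len2 0 0 (Zmat len1 len2))[i].length = len2 := by
      rw [← List.getD_eq_getElem _ ([] : List Bool) h1]
      exact hsh.2 i hi
    rw [show (matR fs len1 len2 len1)[i] = rowR fs len1 len2 i by
      simp [matR, List.getElem_map, List.getElem_range]]
    apply List.ext_getElem
    · simp [hrowlen, rowR]
    · intro j hj1 hj2
      have hjlt : j < len2 := hrowlen ▸ hj1
      rw [show (rowR fs len1 len2 i)[j] = Rb fs len1 len2 i j by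
        simp [rowR, List.getElem_map, List.getElem_range]]
      rw [← getM_exploreA_eq_Rb]
      unfold getM
      rw [List.getD_eq_getElem _ ([] : List Bool) h1,
        List.getD_eq_getElem _ false hj1]

theorem A_eq_matR (fs : List (List Bool)) :
    reachable_space fs = matR fs fs.length (fs.headD []).length fs.length :=
  exploreA_eq_matR fs fs.length (fs.headD []).length

theorem A_eq_B (fs : List (List Bool)) : reachable_space fs = reachable_space_alt fs := by
  rw [A_eq_matR, B_eq_matR]

-- ===== VERDICT (by name: the statement is the Claim_ definition above) =====
theorem reachable_space_spec : Claim_equal_reachable_space := by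
  intro fs _hd _hp
  exact A_eq_B fs
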